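-- pv_equiv track=rewrite | github.com/Fcabla/MemoraBot | app/utils.py | extract_section_by_keywords
-- ===== SOURCE A (Python) =====
-- from typing import Optional, List, Tuple
--
-- def extract_section_by_keywords(
--     content: str,
--     keywords: List[str],
--     context_lines: int = 3
-- ) -> Optional[Tuple[int, int, List[str]]]:
--     """Extract a section from content based on keywords.
--
--     Args:
--         content: File content
--         keywords: Keywords to identify the section
--         context_lines: Lines of context around matches
--
--     Returns:
--         (start_line, end_line, section_lines) or None if not found
--     """
--     lines = content.split('\n')
--
--     # Find lines containing keywords
--     matching_lines = []
--     for i, line in enumerate(lines):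
--         if any(keyword.lower() in line.lower() for keyword in keywords):
--             matching_lines.append(i)
--
--     if not matching_lines:
--         return None
--
--     # Determine section boundaries
--     start_line = max(0, min(matching_lines) - context_lines)
--     end_line = min(len(lines), max(matching_lines) + context_lines + 1)
--
--     return start_line, end_line, lines[start_line:end_line]
-- ===== SOURCE B (Python) =====
-- def extract_section_by_keywords(content, keywords, context_lines=3):
--     """Find first/last matching line by two short scans, then slice with context."""
--     lines = content.split('\n')
--     lowkws = [k.lower() for k in keywords]
--
--     def hit(line):
--         low = line.lower()
--         return any(k in low for k in lowkws)
--
--     first = None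
--     for i, line in enumerate(lines):
--         if hit(line):
--             first = i
--             break
--     if first is None:
--         return None
--
--     last = first
--     for j in range(len(lines) - 1, first, -1):
--         if hit(lines[j]):
--             last = j
--             break
--
--     start_line = max(0, first - context_lines)
--     end_line = min(len(lines), last + context_lines + 1)
--     return start_line, end_line, lines[start_line:end_line]
-- ===== Notes on version B (the rewrite author's own statement) =====
-- stated objective: alternative
-- what changed: A collects the full list of matching line indices and takes its min and max; B lowercases the keywords once and does one forward scan that stops at the first matching line and one backward scan that stops at the last, then slices with the same boundary arithmetic.
import Mathlib
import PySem

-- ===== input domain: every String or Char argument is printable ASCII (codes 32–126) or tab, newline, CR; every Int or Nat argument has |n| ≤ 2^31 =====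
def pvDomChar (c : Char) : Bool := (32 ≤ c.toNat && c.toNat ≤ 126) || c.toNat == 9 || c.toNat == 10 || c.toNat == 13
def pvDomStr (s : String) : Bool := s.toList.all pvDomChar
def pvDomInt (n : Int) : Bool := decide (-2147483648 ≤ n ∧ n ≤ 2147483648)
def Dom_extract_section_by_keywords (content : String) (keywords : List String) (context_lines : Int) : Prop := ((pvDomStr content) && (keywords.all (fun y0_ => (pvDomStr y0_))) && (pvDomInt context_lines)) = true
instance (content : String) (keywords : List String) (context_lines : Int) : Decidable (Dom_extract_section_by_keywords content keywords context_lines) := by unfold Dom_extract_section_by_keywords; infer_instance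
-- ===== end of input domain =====

-- B replaces A's full pass collecting every matching index (then min/max) by one forward
-- scan for the first match and one backward scan for the last (objective: alternative decomposition).

-- ===== PORT A =====
def extract_section_by_keywords (content : String) (keywords : List String) (context_lines : Int) : Option (Int × Int × List String) :=
  let lines := (PySem.Str.split? content "\n").getD []  -- split? is some: sep "\n" ≠ ""
  let matching_lines := (PySem.List.enumerate lines 0).foldl
    (fun acc p =>
      if keywords.any (fun kw => PySem.Str.isIn (PySem.Str.lower kw) (PySem.Str.lower p.2)) then
        acc ++ [p.1]
      else acc) []
  -- 'if not matching_lines: return None' + min/max of the nonempty list, as one match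
  match PySem.List.min? matching_lines (fun x => x), PySem.List.max? matching_lines (fun x => x) with
  | some mn, some mx =>
      let start_line := max 0 (mn - context_lines)
      let end_line := min ((lines.length : Int)) (mx + context_lines + 1)
      some (start_line, end_line, PySem.List.slice lines (some start_line) (some end_line))
  | _, _ => none

-- ===== PORT B =====
def pvHit (lowkws : List String) (line : String) : Bool :=
  lowkws.any (fun k => PySem.Str.isIn k (PySem.Str.lower line))

-- forward scan: index of the first matching line, counting from i
def pvFindFirst (lowkws : List String) : List String → Nat → Option Nat
  | [], _ => none
  | l :: ls, i => if pvHit lowkws l then some i else pvFindFirst lowkws ls (i + 1)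

-- backward scan: for j in range(j, stop, -1): first matching index, else stop
def pvFindBack (lowkws : List String) (lines : List String) (stop : Nat) : Nat → Nat
  | 0 => stop
  | j + 1 =>
    if j + 1 ≤ stop then stop
    else if pvHit lowkws (lines.getD (j + 1) "") then j + 1
    else pvFindBack lowkws lines stop j

def extract_section_by_keywords_alt (content : String) (keywords : List String) (context_lines : Int) : Option (Int × Int × List String) :=
  let lines := (PySem.Str.split? content "\n").getD []  -- split? is some: sep "\n" ≠ ""
  let lowkws := keywords.map PySem.Str.lower
  match pvFindFirst lowkws lines 0 with
  | none => none
  | some first =>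
    let last := pvFindBack lowkws lines first (lines.length - 1)
    let start_line := max 0 ((first : Int) - context_lines)
    let end_line := min ((lines.length : Int)) ((last : Int) + context_lines + 1)
    some (start_line, end_line, PySem.List.slice lines (some start_line) (some end_line))

-- ===== PRECONDITION & SPEC =====
def Spec_extract_section_by_keywords (content : String) (keywords : List String) (context_lines : Int) (out : Option (Int × Int × List String)) : Prop := out = extract_section_by_keywords_alt content keywords context_lines
instance (content : String) (keywords : List String) (context_lines : Int) (out : Option (Int × Int × List String)) : Decidable (Spec_extract_section_by_keywords content keywords context_lines out) := by unfold Spec_extract_section_by_keywords; infer_instance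

-- ===== CLAIM (what is proved, stated in full; the proofs are below) =====
def Claim_equal_extract_section_by_keywords : Prop := ∀ (content : String) (keywords : List String) (context_lines : Int), Dom_extract_section_by_keywords content keywords context_lines → Spec_extract_section_by_keywords content keywords context_lines (extract_section_by_keywords content keywords context_lines)

-- ===== LEMMAS AND PROOFS =====

def qIdxs (q : String → Bool) (lines : List String) : List Nat :=
  (List.range lines.length).filter (fun i => q (lines.getD i ""))

theorem qIdxs_cons (q : String → Bool) (l : String) (ls : List String) :
    qIdxs q (l :: ls) =
      (if q l then [0] else []) ++ (qIdxs q ls).map (· + 1) := by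
  unfold qIdxs
  show List.filter _ (List.range (ls.length + 1)) = _
  rw [List.range_succ_eq_map]
  rw [List.filter_cons]
  simp only [List.getD, List.getElem?_cons_zero, Option.getD_some, List.filter_map]
  split <;> simp [Function.comp_def]

theorem qIdxs_pairwise (q : String → Bool) (lines : List String) :
    (qIdxs q lines).Pairwise (· < ·) :=
  List.Pairwise.sublist (List.filter_sublist) (List.pairwise_lt_range)

theorem mem_qIdxs (q : String → Bool) (lines : List String) (i : Nat) :
    i ∈ qIdxs q lines ↔ i < lines.length ∧ q (lines.getD i "") := by
  simp [qIdxs, List.mem_filter]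

theorem foldl_min_eq (x : Int) (t : List Int) (h : ∀ y ∈ t, x ≤ y) :
    t.foldl min x = x := by
  induction t with
  | nil => rfl
  | cons y t ih =>
    have hxy : min x y = x := min_eq_left (h y (by simp))
    simp only [List.foldl_cons, hxy]
    exact ih (fun z hz => h z (by simp [hz]))

theorem foldl_max_eq (x : Int) (t : List Int)
    (h : (x :: t).Pairwise (· ≤ ·)) :
    t.foldl max x = t.getLast?.getD x := by
  induction t generalizing x with
  | nil => rfl
  | cons y t ih =>
    rcases List.pairwise_cons.1 h with ⟨hx, hyt⟩
    have hxy : max x y = y := max_eq_right (hx y (by simp))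
    simp only [List.foldl_cons, hxy]
    rw [ih y hyt]
    cases t with
    | nil => rfl
    | cons a t =>
      cases h' : (a :: t).getLast? with
      | none => simp at h'
      | some v => simp [h']

theorem enum_filter_map (q : String → Bool) (ls : List String) (s : Int) :
    ((PySem.List.enumerate ls s).filter (fun p => q p.2)).map (·.1) =
      (qIdxs q ls).map (fun (k : Nat) => s + (k : Int)) := by
  induction ls generalizing s with
  | nil => simp [PySem.List.enumerate_nil, qIdxs]
  | cons l ls ih =>
    rw [PySem.List.enumerate_cons, qIdxs_cons, List.filter_cons]
    dsimp only
    rw [List.map_append, List.map_map]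
    by_cases hql : q l
    · rw [if_pos hql, if_pos hql, List.map_cons, ih (s+1)]
      simp only [List.map_cons, List.map_nil, List.singleton_append, Function.comp_def]
      congr 1
      · simp
      · apply List.map_congr_left; intro k _; push_cast; ring
    · rw [if_neg hql, if_neg hql, ih (s+1)]
      simp only [Function.comp_def]
      apply List.map_congr_left; intro k _; push_cast; ring

theorem matching_eq (q : String → Bool) (lines : List String) :
    (PySem.List.enumerate lines 0).foldl
      (fun acc p => if q p.2 then acc ++ [p.1] else acc) [] =
    (qIdxs q lines).map (Nat.cast : Nat → Int) := by
  rw [PySem.List.foldl_append_if (fun p => q p.2) (fun p : Int × String => p.1) (PySem.List.enumerate lines 0) []]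
  rw [List.nil_append, enum_filter_map]
  simp




theorem findFirst_eq (lk : List String) (ls : List String) (s : Nat) :
    pvFindFirst lk ls s = ((qIdxs (pvHit lk) ls).head?).map (· + s) := by
  induction ls generalizing s with
  | nil => simp [pvFindFirst, qIdxs]
  | cons l ls ih =>
    rw [qIdxs_cons]
    by_cases h : pvHit lk l
    · simp [pvFindFirst, h]
    · simp only [pvFindFirst, h, Bool.false_eq_true, if_false, List.nil_append]
      rw [ih (s+1)]
      cases hq : (qIdxs (pvHit lk) ls).head? with
      | none => simp [List.head?_map, hq]
      | some a => simp [List.head?_map, hq]; omega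

theorem findBack_eq (lk : List String) (lines : List String) (stop j : Nat) :
    pvFindBack lk lines stop j =
      (((List.range' (stop + 1) (j - stop)).filter
          (fun k => pvHit lk (lines.getD k ""))).getLast?).getD stop := by
  induction j with
  | zero => simp [pvFindBack]
  | succ j ih =>
    rw [pvFindBack]
    by_cases hle : j + 1 ≤ stop
    · rw [if_pos hle]
      have : j + 1 - stop = 0 := by omega
      simp [this]
    · rw [if_neg hle]
      have h1 : j + 1 - stop = (j - stop) + 1 := by omega
      have h2 : stop + 1 + 1 * (j - stop) = j + 1 := by omega
      rw [h1, List.range'_concat, h2, List.filter_append]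
      by_cases hq : pvHit lk (lines.getD (j+1) "")
      · rw [if_pos hq]
        rw [show List.filter (fun k => pvHit lk (lines.getD k "")) [j+1] = [j+1] from by
          simp only [List.filter_cons]; simp only [List.getD] at hq; simp [hq]]
        rw [List.getLast?_concat]
        rfl
      · rw [if_neg hq, ih]
        rw [show List.filter (fun k => pvHit lk (lines.getD k "")) [j+1] = [] from by
          simp only [List.filter_cons]; simp only [List.getD] at hq; simp [hq]]
        rw [List.append_nil]

theorem range'_filter_eq_rest (q : String → Bool) (lines : List String)
    (i0 : Nat) (rest : List Nat) (h : qIdxs q lines = i0 :: rest) :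
    (List.range' (i0 + 1) (lines.length - (i0 + 1))).filter
      (fun k => q (lines.getD k "")) = rest := by
  have hi0 : i0 ∈ qIdxs q lines := by rw [h]; exact List.mem_cons_self
  have hi0len : i0 < lines.length := ((mem_qIdxs q lines i0).1 hi0).1
  have hsplit : List.range lines.length =
      List.range' 0 (i0 + 1) ++ List.range' (i0 + 1) (lines.length - (i0 + 1)) := by
    rw [List.range_eq_range']
    have := List.range'_append (s := 0) (m := i0 + 1) (n := lines.length - (i0 + 1)) (step := 1)
    simp only [Nat.one_mul, Nat.zero_add] at this
    conv_lhs => rw [show lines.length = i0 + 1 + (lines.length - (i0 + 1)) from by omega]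
    rw [this]
  have key : i0 :: rest =
      (List.range' 0 (i0 + 1)).filter (fun k => q (lines.getD k "")) ++
      (List.range' (i0 + 1) (lines.length - (i0 + 1))).filter (fun k => q (lines.getD k "")) := by
    rw [← List.filter_append, ← hsplit, ← h]; rfl
  have hrest : ∀ x ∈ rest, i0 < x := by
    have hp := qIdxs_pairwise q lines
    rw [h] at hp
    exact (List.pairwise_cons.1 hp).1
  cases hL1 : (List.range' 0 (i0 + 1)).filter (fun k => q (lines.getD k "")) with
  | nil =>
    exfalso
    rw [hL1, List.nil_append] at key
    have : i0 ∈ (List.range' (i0 + 1) (lines.length - (i0 + 1))).filter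
        (fun k => q (lines.getD k "")) := by rw [← key]; exact List.mem_cons_self
    have := (List.mem_range'_1.1 (List.mem_filter.1 this).1).1
    omega
  | cons a L1' =>
    rw [hL1, List.cons_append] at key
    have ha : a = i0 := (List.cons_eq_cons.1 key).1.symm
    have hrest' : rest = L1' ++ (List.range' (i0 + 1) (lines.length - (i0 + 1))).filter
        (fun k => q (lines.getD k "")) := (List.cons_eq_cons.1 key).2
    cases hL1' : L1' with
    | nil =>
      rw [hL1'] at hrest'
      simp only [List.nil_append] at hrest'
      exact hrest'.symm
    | cons b L1'' =>
      exfalso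
      have hbmem : b ∈ (List.range' 0 (i0 + 1)).filter (fun k => q (lines.getD k "")) := by
        rw [hL1, hL1']; exact List.mem_cons_of_mem _ List.mem_cons_self
      have hble : b < i0 + 1 := by
        have := (List.mem_range'_1.1 (List.mem_filter.1 hbmem).1).2
        omega
      have : i0 < b := hrest b (by rw [hrest', hL1']; exact List.mem_cons_self)
      omega

-- ===== VERDICT (by name: the statement is the Claim_ definition above) =====
theorem extract_section_by_keywords_spec : Claim_equal_extract_section_by_keywords := by
  intro content keywords c _
  unfold Spec_extract_section_by_keywords
  simp only [extract_section_by_keywords, extract_section_by_keywords_alt]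
  have hfun : (fun (acc : List Int) (p : Int × String) =>
      if keywords.any (fun kw => PySem.Str.isIn (PySem.Str.lower kw) (PySem.Str.lower p.2)) then
        acc ++ [p.1] else acc) =
      (fun acc p => if pvHit (keywords.map PySem.Str.lower) p.2 then acc ++ [p.1] else acc) := by
    funext acc p
    simp [pvHit, List.any_map, Function.comp_def]
  rw [hfun]
  set lines := (PySem.Str.split? content "\n").getD [] with hlines
  set lk := keywords.map PySem.Str.lower with hlk
  rw [matching_eq (pvHit lk) lines, findFirst_eq lk lines 0]
  cases hq : qIdxs (pvHit lk) lines with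
  | nil => rfl
  | cons i0 rest =>
    have hp := qIdxs_pairwise (pvHit lk) lines
    rw [hq] at hp
    have hrest : ∀ x ∈ rest, i0 < x := (List.pairwise_cons.1 hp).1
    have hi0len : i0 < lines.length :=
      ((mem_qIdxs (pvHit lk) lines i0).1 (by rw [hq]; exact List.mem_cons_self)).1
    -- A side: min and max of the matching indices
    simp only [List.map_cons, PySem.List.min?_id_cons, PySem.List.max?_id_cons]
    have hmin : (rest.map (Nat.cast : Nat → Int)).foldl min ((i0 : Nat) : Int) = (i0 : Int) := by
      apply foldl_min_eq
      intro y hy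
      rcases List.mem_map.1 hy with ⟨k, hk, rfl⟩
      exact_mod_cast Nat.le_of_lt (hrest k hk)
    have hmax : (rest.map (Nat.cast : Nat → Int)).foldl max ((i0 : Nat) : Int) =
        ((rest.getLast?.getD i0 : Nat) : Int) := by
      rw [foldl_max_eq]
      · rw [List.getLast?_map]
        cases rest.getLast? <;> simp
      · rw [← List.map_cons]
        apply List.Pairwise.map
        · intro a b hab
          exact_mod_cast Nat.le_of_lt hab
        · exact hp
    rw [hmin, hmax]
    -- B side: the backward scan finds the last matching index
    have hback : pvFindBack lk lines i0 (lines.length - 1) = rest.getLast?.getD i0 := by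
      rw [findBack_eq]
      rw [show lines.length - 1 - i0 = lines.length - (i0 + 1) from by omega]
      rw [range'_filter_eq_rest (pvHit lk) lines i0 rest hq]
    simp only [List.head?_cons, Option.map_some, Nat.add_zero, hback]
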